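-- pv_equiv track=rewrite | github.com/gahong01022/my_tool | parse_counter_tool/test.py | get_tx_data
-- ===== SOURCE A (Python) =====
-- def get_tx_data(counter_type, counter_data):
--     """提取TX相關的計數器數據"""
--     tx_data = {}
--
--     if counter_type == 'SS':
--         # SS Counter TX: Rx Start, Rx Terminal
--         for key, value in counter_data.items():
--             if 'Rx Start' in key or 'Rx Terminal' in key:
--                 tx_data[key] = value
--
--     elif counter_type == 'FCM':
--         # FCM Counter TX: 除了RX方向的計數器以外的所有計數器
--         rx_keys = {
--             'Tx to System side_S', 'Tx to System side_T',
--             'Pause to System side', 'Pause from Line side',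
--             'Rx from Line side_S', 'Rx from Line side_T'
--         }
--         for key, value in counter_data.items():
--             if not any(rx_key in key for rx_key in rx_keys):
--                 tx_data[key] = value
--
--     elif counter_type == 'ASIX MAC':
--         # MAC Counter TX: Tx Error from System side, Tx from System side
--         for key, value in counter_data.items():
--             if ('Tx Error from System side' in key or
--                 'Tx from System side' in key):
--                 tx_data[key] = value
--
--     elif counter_type == 'LS':
--         # LS Counter TX: 除了RX方向的計數器以外的所有計數器
--         rx_keys = {
--             'Rx_DEC', 'Rx from Line side_S', 'Rx from Line side_T'
--         }
--         for key, value in counter_data.items():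
--             if not any(rx_key in key for rx_key in rx_keys):
--                 tx_data[key] = value
--
--     return tx_data
-- ===== SOURCE B (Python) =====
-- _RULES = {
--     'SS': (['Rx Start', 'Rx Terminal'], True),
--     'FCM': (['Tx to System side_S', 'Tx to System side_T',
--              'Pause to System side', 'Pause from Line side',
--              'Rx from Line side_S', 'Rx from Line side_T'], False),
--     'ASIX MAC': (['Tx Error from System side', 'Tx from System side'], True),
--     'LS': (['Rx_DEC', 'Rx from Line side_S', 'Rx from Line side_T'], False),
-- }
--
--
-- def get_tx_data(counter_type, counter_data):
--     """提取TX相關的計數器數據"""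
--     if counter_type not in _RULES:
--         return {}
--     patterns, include = _RULES[counter_type]
--     # start from a full copy, then prune the entries that are not TX-related
--     tx_data = dict(counter_data)
--     for key in list(tx_data):
--         if any(p in key for p in patterns) != include:
--             del tx_data[key]
--     return tx_data
-- ===== Notes on version B (the rewrite author's own statement) =====
-- stated objective: alternative
-- what changed: A accumulates matching entries into a fresh dict via one of four per-mode loops; B looks the mode up in a rules table once, copies the whole input dict, and then prunes it by deleting every key whose pattern-match status disagrees with the mode's include flag.
import Mathlib
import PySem

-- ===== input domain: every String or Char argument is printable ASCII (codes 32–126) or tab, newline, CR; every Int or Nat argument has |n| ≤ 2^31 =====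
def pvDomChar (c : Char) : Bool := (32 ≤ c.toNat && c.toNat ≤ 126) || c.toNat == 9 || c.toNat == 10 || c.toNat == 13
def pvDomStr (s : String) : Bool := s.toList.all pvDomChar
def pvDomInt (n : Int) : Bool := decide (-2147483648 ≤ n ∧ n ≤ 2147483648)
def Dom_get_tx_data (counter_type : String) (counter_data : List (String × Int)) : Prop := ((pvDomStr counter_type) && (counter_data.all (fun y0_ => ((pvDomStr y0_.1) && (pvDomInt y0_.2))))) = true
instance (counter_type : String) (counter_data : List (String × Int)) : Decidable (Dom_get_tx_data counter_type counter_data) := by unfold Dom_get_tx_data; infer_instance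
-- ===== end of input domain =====

-- B inverts A's strategy: instead of four per-mode loops accumulating the matching
-- entries into a fresh dict, B copies the whole dict once and then prunes the
-- non-matching keys from it (objective: alternative — copy-then-delete vs accumulate).


-- ===== PORT A =====
-- literal transliteration of A: tx_data is a Python dict built by one of four loops
def get_tx_data (counter_type : String) (counter_data : List (String × Int)) : List (String × Int) :=
  let tx_data : PySem.Dict String Int := PySem.Dict.empty
  let tx_data :=
    if counter_type == "SS" then
      counter_data.foldl (fun d kv =>
        if PySem.Str.isIn "Rx Start" kv.1 || PySem.Str.isIn "Rx Terminal" kv.1 then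
          d.insert kv.1 kv.2 else d) tx_data
    else if counter_type == "FCM" then
      let rx_keys : PySem.Set String := PySem.Set.ofList
        ["Tx to System side_S", "Tx to System side_T",
         "Pause to System side", "Pause from Line side",
         "Rx from Line side_S", "Rx from Line side_T"]
      counter_data.foldl (fun d kv =>
        if !(rx_keys.any (fun rx_key => PySem.Str.isIn rx_key kv.1)) then
          d.insert kv.1 kv.2 else d) tx_data
    else if counter_type == "ASIX MAC" then
      counter_data.foldl (fun d kv =>
        if PySem.Str.isIn "Tx Error from System side" kv.1 ||
           PySem.Str.isIn "Tx from System side" kv.1 then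
          d.insert kv.1 kv.2 else d) tx_data
    else if counter_type == "LS" then
      let rx_keys : PySem.Set String := PySem.Set.ofList
        ["Rx_DEC", "Rx from Line side_S", "Rx from Line side_T"]
      counter_data.foldl (fun d kv =>
        if !(rx_keys.any (fun rx_key => PySem.Str.isIn rx_key kv.1)) then
          d.insert kv.1 kv.2 else d) tx_data
    else tx_data
  tx_data.items

-- ===== PORT B =====
-- the module-level table _RULES of Source B
def pvRules : PySem.Dict String (List String × Bool) := PySem.Dict.ofList
  [("SS", (["Rx Start", "Rx Terminal"], true)),
   ("FCM", (["Tx to System side_S", "Tx to System side_T",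
             "Pause to System side", "Pause from Line side",
             "Rx from Line side_S", "Rx from Line side_T"], false)),
   ("ASIX MAC", (["Tx Error from System side", "Tx from System side"], true)),
   ("LS", (["Rx_DEC", "Rx from Line side_S", "Rx from Line side_T"], false))]

-- Source B: copy the whole dict, then iterate over a snapshot of its keys deleting
-- the entries whose match status disagrees with the include flag
def get_tx_data_alt (counter_type : String) (counter_data : List (String × Int)) : List (String × Int) :=
  match pvRules.get? counter_type with
  | none => []
  | some (patterns, incl) =>
      let tx_data : PySem.Dict String Int := PySem.Dict.ofList counter_data
      (tx_data.keys.foldl (fun d k =>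
        if (patterns.any (fun p => PySem.Str.isIn p k)) != incl then d.erase k else d)
        tx_data).items

-- ===== PRECONDITION & SPEC =====
-- counter_data is a Python dict, whose keys are necessarily distinct; Pre_ states
-- exactly that invariant (it excludes no dict A can actually be called on).
def Pre_get_tx_data (counter_type : String) (counter_data : List (String × Int)) : Prop :=
  (counter_data.map Prod.fst).Nodup
instance (counter_type : String) (counter_data : List (String × Int)) : Decidable (Pre_get_tx_data counter_type counter_data) := by unfold Pre_get_tx_data; infer_instance
def pvWitness_get_tx_data : String × (List (String × Int)) :=
  ("SS", [("Rx Start A", 1), ("Tx foo", 2)])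
def Spec_get_tx_data (counter_type : String) (counter_data : List (String × Int)) (out : List (String × Int)) : Prop := out = get_tx_data_alt counter_type counter_data
instance (counter_type : String) (counter_data : List (String × Int)) (out : List (String × Int)) : Decidable (Spec_get_tx_data counter_type counter_data out) := by unfold Spec_get_tx_data; infer_instance

-- ===== CLAIM (what is proved, stated in full; the proofs are below) =====
def Claim_equal_get_tx_data : Prop := ∀ (counter_type : String) (counter_data : List (String × Int)), Dom_get_tx_data counter_type counter_data → Pre_get_tx_data counter_type counter_data → Spec_get_tx_data counter_type counter_data (get_tx_data counter_type counter_data)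

-- ===== LEMMAS AND PROOFS =====

-- A's side: a filtering accumulation loop over distinct fresh keys is filter
theorem pv_foldl_filter (q : String × Int → Bool) :
    ∀ (cd : List (String × Int)) (d : PySem.Dict String Int),
      (cd.map Prod.fst).Nodup →
      (∀ k ∈ cd.map Prod.fst, d.contains k = false) →
      (cd.foldl (fun d kv => if q kv then d.insert kv.1 kv.2 else d) d).items
        = d.items ++ cd.filter q := by
  intro cd
  induction cd with
  | nil => intro d _ _; simp
  | cons kv rest ih =>
    intro d hnd hfresh
    simp only [List.map_cons, List.nodup_cons] at hnd
    have hkv : d.contains kv.1 = false := hfresh kv.1 (by simp)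
    have hrest : ∀ k ∈ rest.map Prod.fst,
        (if q kv then d.insert kv.1 kv.2 else d).contains k = false := by
      intro k hk
      have hne : k ≠ kv.1 := fun h => hnd.1 (h ▸ hk)
      have hd : d.contains k = false := hfresh k (by simp [hk])
      split
      · rw [PySem.Dict.contains_insert]
        simp [hd, hne]
      · exact hd
    rcases h : q kv with _ | _
    · simpa [h] using ih d hnd.2 (by simpa [h] using hrest)
    · have := ih (d.insert kv.1 kv.2) hnd.2 (by simpa [h] using hrest)
      have hins : (d.insert kv.1 kv.2).items = d.items ++ [(kv.1, kv.2)] := by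
        simp [PySem.Dict.items_insert, hkv]
      simp only [List.foldl_cons, h, if_true, List.filter_cons, this, hins]
      simp

-- dict(counter_data) under distinct keys keeps the items list as is
theorem pv_ofList_items (cd : List (String × Int)) (h : (cd.map Prod.fst).Nodup) :
    (PySem.Dict.ofList cd).items = cd := by
  unfold PySem.Dict.ofList PySem.Dict.update
  have := PySem.Dict.items_foldl_insert_fresh (l := cd) (k := Prod.fst) (v := Prod.snd)
    (d := PySem.Dict.empty) (by intro a _; simp) h
  simpa using this

-- B's side: a delete loop over a key list is a filter of the items
theorem pv_foldl_erase (c : String → Bool) :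
    ∀ (ks : List String) (d : PySem.Dict String Int),
      (ks.foldl (fun d k => if c k then d.erase k else d) d).items
        = d.items.filter (fun kv => !(c kv.1 && ks.contains kv.1)) := by
  intro ks
  induction ks with
  | nil => intro d; simp
  | cons k ks ih =>
    intro d
    rcases h : c k with _ | _
    · simp only [List.foldl_cons, h, Bool.false_eq_true, if_false, ih]
      apply List.filter_congr
      intro kv _
      by_cases hk : kv.1 = k
      · simp [hk, h]
      · simp [hk]
    · simp only [List.foldl_cons, h, if_true, ih]
      have : (d.erase k).items = d.items.filter (fun p => !(p.1 == k)) := rfl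
      rw [this, List.filter_filter]
      apply List.filter_congr
      intro kv _
      by_cases hk : kv.1 = k
      · simp [hk, h]
      · simp [hk]

-- B on a known rule collapses to one filter of counter_data
theorem pv_alt_filter (ct : String) (patterns : List String) (incl : Bool)
    (hget : pvRules.get? ct = some (patterns, incl))
    (cd : List (String × Int)) (h : (cd.map Prod.fst).Nodup) :
    get_tx_data_alt ct cd
      = cd.filter (fun kv => (patterns.any (fun p => PySem.Str.isIn p kv.1)) == incl) := by
  unfold get_tx_data_alt
  rw [hget]
  simp only
  rw [show (PySem.Dict.ofList cd).keys = cd.map Prod.fst from by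
        rw [PySem.Dict.keys, pv_ofList_items cd h]]
  rw [pv_foldl_erase _ (cd.map Prod.fst) _, pv_ofList_items cd h]
  apply List.filter_congr
  intro kv hkv
  have hmem : (cd.map Prod.fst).contains kv.1 = true := by
    simp
    exact ⟨kv.2, by simpa using hkv⟩
  rw [hmem]
  cases patterns.any (fun p => PySem.Str.isIn p kv.1) <;> cases incl <;> simp

-- ===== VERDICT (by name: the statement is the Claim_ definition above) =====
theorem get_tx_data_spec : Claim_equal_get_tx_data := by
  intro ct cd _ hpre
  unfold Spec_get_tx_data get_tx_data
  have hfresh : ∀ k ∈ cd.map Prod.fst, (PySem.Dict.empty : PySem.Dict String Int).contains k = false := by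
    intro k _; simp
  by_cases h1 : ct = "SS"
  · subst h1
    rw [pv_alt_filter _ ["Rx Start", "Rx Terminal"] true rfl cd hpre]
    simp only [beq_self_eq_true, if_true]
    rw [pv_foldl_filter _ cd _ hpre hfresh]
    rw [show PySem.Dict.empty.items = ([] : List (String × Int)) from rfl, List.nil_append]
    apply List.filter_congr
    intro kv _
    simp
  by_cases h2 : ct = "FCM"
  · subst h2
    rw [pv_alt_filter _ ["Tx to System side_S", "Tx to System side_T",
      "Pause to System side", "Pause from Line side",
      "Rx from Line side_S", "Rx from Line side_T"] false rfl cd hpre]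
    simp only [String.reduceBEq, beq_self_eq_true, Bool.false_eq_true, if_false, if_true]
    rw [pv_foldl_filter _ cd _ hpre hfresh]
    rw [show PySem.Dict.empty.items = ([] : List (String × Int)) from rfl, List.nil_append]
    apply List.filter_congr
    intro kv _
    rw [show (PySem.Set.ofList ["Tx to System side_S", "Tx to System side_T",
      "Pause to System side", "Pause from Line side",
      "Rx from Line side_S", "Rx from Line side_T"] : List String)
      = ["Tx to System side_S", "Tx to System side_T",
      "Pause to System side", "Pause from Line side",
      "Rx from Line side_S", "Rx from Line side_T"] from by decide]
    cases hh : (["Tx to System side_S", "Tx to System side_T",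
      "Pause to System side", "Pause from Line side",
      "Rx from Line side_S", "Rx from Line side_T"].any
        (fun p => PySem.Str.isIn p kv.1)) <;> simp_all
  by_cases h3 : ct = "ASIX MAC"
  · subst h3
    rw [pv_alt_filter _ ["Tx Error from System side", "Tx from System side"] true rfl cd hpre]
    simp only [String.reduceBEq, beq_self_eq_true, Bool.false_eq_true, if_false, if_true]
    rw [pv_foldl_filter _ cd _ hpre hfresh]
    rw [show PySem.Dict.empty.items = ([] : List (String × Int)) from rfl, List.nil_append]
    apply List.filter_congr
    intro kv _
    simp
  by_cases h4 : ct = "LS"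
  · subst h4
    rw [pv_alt_filter _ ["Rx_DEC", "Rx from Line side_S", "Rx from Line side_T"] false rfl cd hpre]
    simp only [String.reduceBEq, beq_self_eq_true, Bool.false_eq_true, if_false, if_true]
    rw [pv_foldl_filter _ cd _ hpre hfresh]
    rw [show PySem.Dict.empty.items = ([] : List (String × Int)) from rfl, List.nil_append]
    apply List.filter_congr
    intro kv _
    rw [show (PySem.Set.ofList ["Rx_DEC", "Rx from Line side_S", "Rx from Line side_T"] : List String)
      = ["Rx_DEC", "Rx from Line side_S", "Rx from Line side_T"] from by decide]
    cases hh : (["Rx_DEC", "Rx from Line side_S", "Rx from Line side_T"].any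
        (fun p => PySem.Str.isIn p kv.1)) <;> simp_all
  · have hget : pvRules.get? ct = none := by
      have htab : pvRules = PySem.Dict.mk
        [("SS", (["Rx Start", "Rx Terminal"], true)),
         ("FCM", (["Tx to System side_S", "Tx to System side_T",
                   "Pause to System side", "Pause from Line side",
                   "Rx from Line side_S", "Rx from Line side_T"], false)),
         ("ASIX MAC", (["Tx Error from System side", "Tx from System side"], true)),
         ("LS", (["Rx_DEC", "Rx from Line side_S", "Rx from Line side_T"], false))] := by rfl
      rw [htab]
      simp [PySem.Dict.get?, beq_iff_eq,
        Ne.symm h1, Ne.symm h2, Ne.symm h3, Ne.symm h4]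
    unfold get_tx_data_alt
    rw [hget]
    simp [beq_iff_eq, h1, h2, h3, h4, show PySem.Dict.empty.items = ([] : List (String × Int)) from rfl]
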